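-- pv_equiv track=rewrite | github.com/jinbless/OHS | backend/app/services/hazard_rule_engine.py | summarize_penalty_candidates
-- ===== SOURCE A (Python) =====
-- def summarize_penalty_candidates(candidates: list[dict]) -> list[dict]:
--     """Build legacy PenaltyInfo-compatible rows from PenaltyRule candidates."""
--     summaries: dict[str, dict] = {}
--     for item in candidates:
--         article_code = item.get("penalty_article_id") or item.get("violated_article_id") or ""
--         if not article_code:
--             continue
--         summary = summaries.setdefault(
--             article_code,
--             {
--                 "article_code": article_code,
--                 "title": item.get("basis_text") or article_code,
--                 "criminal_employer_penalty": None,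
--                 "criminal_death_penalty": None,
--                 "admin_max_fine": None,
--             },
--         )
--         desc = item.get("penalty_description")
--         if not desc:
--             continue
--         if item.get("accident_outcome") == "Death":
--             summary["criminal_death_penalty"] = summary["criminal_death_penalty"] or desc
--         elif item.get("sanction_type") == "AdministrativeFine":
--             summary["admin_max_fine"] = summary["admin_max_fine"] or desc
--         elif item.get("subject_role") == "Employer":
--             summary["criminal_employer_penalty"] = summary["criminal_employer_penalty"] or desc
--     return list(summaries.values())
-- ===== SOURCE B (Python) =====
-- def summarize_penalty_candidates(candidates: list[dict]) -> list[dict]: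
--     """Two-pass rewrite: group candidates by article code first, then build each
--     summary row by classifying every grouped item and taking the first match per field."""
--
--     def code_of(item):
--         return item.get("penalty_article_id") or item.get("violated_article_id") or ""
--
--     def classify(item):
--         desc = item.get("penalty_description")
--         if not desc:
--             return None
--         if item.get("accident_outcome") == "Death":
--             return ("criminal_death_penalty", desc)
--         if item.get("sanction_type") == "AdministrativeFine":
--             return ("admin_max_fine", desc)
--         if item.get("subject_role") == "Employer":
--             return ("criminal_employer_penalty", desc)
--         return None
--
--     groups: dict[str, list] = {}
--     for item in candidates:
--         code = code_of(item)
--         if code: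
--             groups.setdefault(code, []).append(item)
--
--     rows = []
--     for code, items in groups.items():
--         tagged = [t for t in map(classify, items) if t is not None]
--
--         def first(field):
--             return next((d for f, d in tagged if f == field), None)
--
--         rows.append({
--             "article_code": code,
--             "title": items[0].get("basis_text") or code,
--             "criminal_employer_penalty": first("criminal_employer_penalty"),
--             "criminal_death_penalty": first("criminal_death_penalty"),
--             "admin_max_fine": first("admin_max_fine"),
--         })
--     return rows
-- ===== Notes on version B (the rewrite author's own statement) =====
-- stated objective: alternative
-- what changed: Replaces A's single pass that mutates per-article summary dicts in a setdefault-keyed accumulator with two passes: first group candidates by article code, then build each row independently by classifying every grouped item into its target field and taking the first match per field.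
import Mathlib
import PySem

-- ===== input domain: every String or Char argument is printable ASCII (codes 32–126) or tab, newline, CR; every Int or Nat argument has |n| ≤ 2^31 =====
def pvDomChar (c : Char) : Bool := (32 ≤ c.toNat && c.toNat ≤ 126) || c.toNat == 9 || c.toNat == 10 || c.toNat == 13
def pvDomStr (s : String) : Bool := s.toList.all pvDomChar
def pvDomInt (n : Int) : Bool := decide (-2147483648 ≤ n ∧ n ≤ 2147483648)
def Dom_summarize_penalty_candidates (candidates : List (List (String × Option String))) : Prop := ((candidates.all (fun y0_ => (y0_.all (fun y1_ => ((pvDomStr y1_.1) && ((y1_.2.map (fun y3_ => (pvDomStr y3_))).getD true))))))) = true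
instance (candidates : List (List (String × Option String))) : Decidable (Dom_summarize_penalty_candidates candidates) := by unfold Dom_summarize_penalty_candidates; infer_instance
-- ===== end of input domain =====

-- B is a two-pass rewrite (group-by-code, then assemble each row by classify + first-match);
-- it returns the same value as A everywhere (objective: alternative decomposition, not speed).

-- shared helpers: `item.get(k)` (value `None` and missing key both give `none`), truthiness, `a or b`
def pvGet (item : List (String × Option String)) (k : String) : Option String :=
  (PySem.Dict.ofList item).getD k none

def pvTruthy : Option String → Bool
  | none => false
  | some s => !(s == "")

-- `a or b` where the result is used as a string (`… or code`, `… or ""`)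
def pvOrS (a : Option String) (b : String) : String :=
  match a with
  | none => b
  | some s => if s = "" then b else s

def codeOf (item : List (String × Option String)) : String :=
  pvOrS (pvGet item "penalty_article_id") (pvOrS (pvGet item "violated_article_id") "")

-- ===== PORT A =====
-- the summary dict literal, as a record (fixed key set; rendered back by rowToList in literal key order)
structure PRow where
  art : String
  title : String
  emp : Option String
  death : Option String
  admin : Option String
deriving DecidableEq, Repr

def initRow (c : String) (item : List (String × Option String)) : PRow :=
  ⟨c, pvOrS (pvGet item "basis_text") c, none, none, none⟩

-- `field = field or desc`
def pvOrO (a : Option String) (desc : String) : Option String :=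
  if pvTruthy a then a else some desc

-- one iteration of A's loop
def stepA (d : PySem.Dict String PRow) (item : List (String × Option String)) :
    PySem.Dict String PRow :=
  let c := codeOf item
  if c = "" then d
  else
    let d1 := d.setdefault c (initRow c item)
    let s := (d1.get? c).getD (initRow c item)   -- the `summary` alias (always present after setdefault)
    match pvGet item "penalty_description" with
    | none => d1
    | some desc =>
      if desc = "" then d1
      else if pvGet item "accident_outcome" = some "Death" then
        d1.insert c { s with death := pvOrO s.death desc }
      else if pvGet item "sanction_type" = some "AdministrativeFine" then
        d1.insert c { s with admin := pvOrO s.admin desc }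
      else if pvGet item "subject_role" = some "Employer" then
        d1.insert c { s with emp := pvOrO s.emp desc }
      else d1

def rowToList (r : PRow) : List (String × Option String) :=
  [("article_code", some r.art), ("title", some r.title),
   ("criminal_employer_penalty", r.emp), ("criminal_death_penalty", r.death),
   ("admin_max_fine", r.admin)]

def summarize_penalty_candidates (candidates : List (List (String × Option String))) : List (List (String × Option String)) :=
  ((candidates.foldl stepA PySem.Dict.empty).values).map rowToList

-- ===== PORT B =====
def classify (item : List (String × Option String)) : Option (String × String) :=
  match pvGet item "penalty_description" with
  | none => none
  | some desc =>
    if desc = "" then none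
    else if pvGet item "accident_outcome" = some "Death" then some ("criminal_death_penalty", desc)
    else if pvGet item "sanction_type" = some "AdministrativeFine" then some ("admin_max_fine", desc)
    else if pvGet item "subject_role" = some "Employer" then some ("criminal_employer_penalty", desc)
    else none

def stepB (g : PySem.Dict String (List (List (String × Option String))))
    (item : List (String × Option String)) :
    PySem.Dict String (List (List (String × Option String))) :=
  let c := codeOf item
  if c = "" then g else g.modify c [] (· ++ [item])

def firstField (tagged : List (String × String)) (field : String) : Option String :=
  (tagged.find? (fun t => t.1 = field)).map (·.2)

def rowOfGroup (code : String) (items : List (List (String × Option String))) :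
    List (String × Option String) :=
  let tagged := (items.map classify).filterMap id
  [("article_code", some code),
   ("title", some (pvOrS (pvGet (items.head?.getD []) "basis_text") code)),
   ("criminal_employer_penalty", firstField tagged "criminal_employer_penalty"),
   ("criminal_death_penalty", firstField tagged "criminal_death_penalty"),
   ("admin_max_fine", firstField tagged "admin_max_fine")]

def summarize_penalty_candidates_alt (candidates : List (List (String × Option String))) : List (List (String × Option String)) :=
  ((candidates.foldl stepB PySem.Dict.empty).items).map (fun p => rowOfGroup p.1 p.2)

-- ===== PRECONDITION & SPEC =====
def Spec_summarize_penalty_candidates (candidates : List (List (String × Option String))) (out : List (List (String × Option String))) : Prop := out = summarize_penalty_candidates_alt candidates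
instance (candidates : List (List (String × Option String))) (out : List (List (String × Option String))) : Decidable (Spec_summarize_penalty_candidates candidates out) := by unfold Spec_summarize_penalty_candidates; infer_instance

-- ===== CLAIM (what is proved, stated in full; the proofs are below) =====
def Claim_equal_summarize_penalty_candidates : Prop := ∀ (candidates : List (List (String × Option String))), Dom_summarize_penalty_candidates candidates → Spec_summarize_penalty_candidates candidates (summarize_penalty_candidates candidates)

-- ===== LEMMAS AND PROOFS =====

-- `a or b` on option values
def oorr (a b : Option String) : Option String := if pvTruthy a then a else b

-- A's per-item row update, phrased through B's classifier
def updRow (r : PRow) (item : List (String × Option String)) : PRow :=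
  match classify item with
  | none => r
  | some (f, desc) =>
    if f = "criminal_death_penalty" then { r with death := oorr r.death (some desc) }
    else if f = "admin_max_fine" then { r with admin := oorr r.admin (some desc) }
    else { r with emp := oorr r.emp (some desc) }

-- the summary row A ends up with for one article's group
def aRow (c : String) (its : List (List (String × Option String))) : PRow :=
  its.foldl updRow (initRow c (its.head?.getD []))

def f0 (p : String × List (List (String × Option String))) : String × PRow :=
  (p.1, aRow p.1 p.2)


lemma classify_truthy {item : List (String × Option String)} {f desc : String}
    (h : classify item = some (f, desc)) : pvTruthy (some desc) = true := by
  unfold classify at h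
  cases hg : pvGet item "penalty_description" with
  | none => simp [hg] at h
  | some d0 =>
    rw [hg] at h
    by_cases hd : d0 = "" <;> simp [hd, pvTruthy] at h ⊢ <;>
      split_ifs at h <;> simp_all

lemma classify_field {item : List (String × Option String)} {f desc : String}
    (h : classify item = some (f, desc)) :
    f = "criminal_death_penalty" ∨ f = "admin_max_fine" ∨ f = "criminal_employer_penalty" := by
  unfold classify at h
  cases hg : pvGet item "penalty_description" with
  | none => simp [hg] at h
  | some d0 =>
    rw [hg] at h
    by_cases hd : d0 = ""
    · simp [hd] at h
    · simp only [hd, if_false] at h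
      split_ifs at h <;> simp_all

lemma stepA_of_code_empty {item : List (String × Option String)}
    (h : codeOf item = "") (d : PySem.Dict String PRow) : stepA d item = d := by
  simp [stepA, h]

lemma stepB_of_code_empty {item : List (String × Option String)}
    (h : codeOf item = "")
    (g : PySem.Dict String (List (List (String × Option String)))) : stepB g item = g := by
  simp [stepB, h]

-- the identity-map fact used for A's "no field updated" branches
lemma items_map_id_of_get? {d : PySem.Dict String PRow} {c : String} {s : PRow}
    (hnd : d.keys.Nodup) (hs : d.get? c = some s) :
    d.items.map (fun p => if (p.1 == c) = true then (c, s) else p) = d.items := by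
  conv_rhs => rw [← List.map_id d.items]
  apply List.map_congr_left
  intro p hp
  by_cases h : p.1 = c
  · have := PySem.Dict.get?_of_mem_items d (k := p.1) (v := p.2) (by simpa using hp) hnd
    rw [h, hs] at this
    obtain ⟨p1, p2⟩ := p
    simp only at h
    subst h
    simp [Option.some_inj.mp this]
  · simp [h]

-- A's step at a key already present: the stored row is rewritten through updRow
lemma stepA_items_of_contains {d : PySem.Dict String PRow} {c : String} {s : PRow}
    {item : List (String × Option String)}
    (hnd : d.keys.Nodup) (hct : d.contains c = true) (hs : d.get? c = some s)
    (hc : codeOf item = c) (h0 : c ≠ "") :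
    (stepA d item).items =
      d.items.map (fun p => if (p.1 == c) = true then (c, updRow s item) else p) := by
  unfold stepA
  rw [hc]
  simp only [h0, if_false]
  rw [PySem.Dict.setdefault_of_contains d _ hct]
  unfold updRow classify
  cases hg : pvGet item "penalty_description" with
  | none => rw [hs]; exact (items_map_id_of_get? hnd hs).symm
  | some desc =>
    rw [hs]
    by_cases hd : desc = ""
    · simp only [hd, if_true, Option.getD_some]
      exact (items_map_id_of_get? hnd hs).symm
    · simp only [hd, if_false, Option.getD_some]
      by_cases h1 : pvGet item "accident_outcome" = some "Death"
      · simp only [h1, if_true]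
        rw [PySem.Dict.items_insert_of_contains d _ hct]
        simp [oorr, pvOrO]
      · simp only [h1, if_false]
        by_cases h2 : pvGet item "sanction_type" = some "AdministrativeFine"
        · simp only [h2, if_true]
          rw [PySem.Dict.items_insert_of_contains d _ hct]
          simp [oorr, pvOrO]
        · simp only [h2, if_false]
          by_cases h3 : pvGet item "subject_role" = some "Employer"
          · simp only [h3, if_true]
            rw [PySem.Dict.items_insert_of_contains d _ hct]
            simp [oorr, pvOrO]
          · simp only [h3, if_false]
            exact (items_map_id_of_get? hnd hs).symm

-- A's step at a fresh key: one row is appended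
lemma stepA_items_of_not_contains {d : PySem.Dict String PRow} {c : String}
    {item : List (String × Option String)}
    (hct : d.contains c = false) (hc : codeOf item = c) (h0 : c ≠ "") :
    (stepA d item).items = d.items ++ [(c, updRow (initRow c item) item)] := by
  unfold stepA
  rw [hc]
  simp only [h0, if_false]
  rw [PySem.Dict.setdefault_of_not_contains d _ hct]
  rw [PySem.Dict.get?_insert_self]
  simp only [Option.getD_some]
  unfold updRow classify
  cases hg : pvGet item "penalty_description" with
  | none => exact PySem.Dict.items_insert_of_not_contains d _ hct
  | some desc =>
    by_cases hd : desc = ""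
    · simp only [hd, if_true]
      exact PySem.Dict.items_insert_of_not_contains d _ hct
    · simp only [hd, if_false, Option.getD_none, Option.getD_some]
      by_cases h1 : pvGet item "accident_outcome" = some "Death"
      · simp only [h1, if_true]
        rw [PySem.Dict.insert_insert_self, PySem.Dict.items_insert_of_not_contains d _ hct]
        simp [pvOrO, oorr]
      · simp only [h1, if_false]
        by_cases h2 : pvGet item "sanction_type" = some "AdministrativeFine"
        · simp only [h2, if_true]
          rw [PySem.Dict.insert_insert_self, PySem.Dict.items_insert_of_not_contains d _ hct]
          simp [pvOrO, oorr]
        · simp only [h2, if_false]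
          by_cases h3 : pvGet item "subject_role" = some "Employer"
          · simp only [h3, if_true]
            rw [PySem.Dict.insert_insert_self, PySem.Dict.items_insert_of_not_contains d _ hct]
            simp [pvOrO, oorr]
          · simp only [h3, if_false]
            exact PySem.Dict.items_insert_of_not_contains d _ hct

-- updRow touches only the three penalty fields
lemma updRow_art (r : PRow) (item : List (String × Option String)) :
    (updRow r item).art = r.art := by
  unfold updRow; cases classify item with
  | none => rfl
  | some p => obtain ⟨f, desc⟩ := p; dsimp only; split_ifs <;> rfl

lemma updRow_title (r : PRow) (item : List (String × Option String)) :
    (updRow r item).title = r.title := by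
  unfold updRow; cases classify item with
  | none => rfl
  | some p => obtain ⟨f, desc⟩ := p; dsimp only; split_ifs <;> rfl

lemma foldl_updRow_art (its : List (List (String × Option String))) (r : PRow) :
    (its.foldl updRow r).art = r.art := by
  induction its generalizing r with
  | nil => rfl
  | cons it rest ih => rw [List.foldl_cons, ih, updRow_art]

lemma foldl_updRow_title (its : List (List (String × Option String))) (r : PRow) :
    (its.foldl updRow r).title = r.title := by
  induction its generalizing r with
  | nil => rfl
  | cons it rest ih => rw [List.foldl_cons, ih, updRow_title]

def okF (a : Option String) : Prop := a = none ∨ pvTruthy a = true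

lemma oorr_none_of_okF {a : Option String} (h : okF a) : oorr a none = a := by
  cases h with
  | inl h => subst h; rfl
  | inr h => simp [oorr, h]

lemma okF_oorr {a : Option String} {b : String} (h : okF a)
    (hb : pvTruthy (some b) = true) : okF (oorr a (some b)) := by
  unfold oorr
  by_cases ht : pvTruthy a = true
  · simp [ht]; exact Or.inr ht
  · simp [ht]; exact Or.inr hb

-- the three field lemmas, one shape
lemma foldl_updRow_death (its : List (List (String × Option String))) (r : PRow)
    (h : okF r.death) :
    (its.foldl updRow r).death =
      oorr r.death (firstField ((its.map classify).filterMap id) "criminal_death_penalty") := by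
  induction its generalizing r with
  | nil => simp [firstField, oorr_none_of_okF h]
  | cons it rest ih =>
    rw [List.foldl_cons]
    cases hcl : classify it with
    | none =>
      have hup : updRow r it = r := by unfold updRow; rw [hcl]
      rw [hup, ih r h]
      simp [hcl]
    | some p =>
      obtain ⟨f, desc⟩ := p
      have hds := classify_truthy hcl
      by_cases hf : f = "criminal_death_penalty"
      · subst hf
        have hup : updRow r it = { r with death := oorr r.death (some desc) } := by
          unfold updRow; rw [hcl]; simp
        rw [hup, ih _ (okF_oorr h hds)]
        simp only [firstField, List.map_cons, hcl]
        simp [oorr]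
        by_cases ht : pvTruthy r.death = true <;> simp [ht, hds]
      · have hne2 : (firstField (((it :: rest).map classify).filterMap id) "criminal_death_penalty")
            = firstField ((rest.map classify).filterMap id) "criminal_death_penalty" := by
          simp [firstField, hcl, hf]
        rw [hne2]
        have hd' : (updRow r it).death = r.death := by
          unfold updRow; rw [hcl]; simp [hf]; split_ifs <;> rfl
        rw [ih _ (by rw [hd']; exact h), hd']

lemma foldl_updRow_admin (its : List (List (String × Option String))) (r : PRow)
    (h : okF r.admin) :
    (its.foldl updRow r).admin =
      oorr r.admin (firstField ((its.map classify).filterMap id) "admin_max_fine") := by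
  induction its generalizing r with
  | nil => simp [firstField, oorr_none_of_okF h]
  | cons it rest ih =>
    rw [List.foldl_cons]
    cases hcl : classify it with
    | none =>
      have hup : updRow r it = r := by unfold updRow; rw [hcl]
      rw [hup, ih r h]
      simp [hcl]
    | some p =>
      obtain ⟨f, desc⟩ := p
      have hds := classify_truthy hcl
      by_cases hf : f = "admin_max_fine"
      · subst hf
        have hup : updRow r it = { r with admin := oorr r.admin (some desc) } := by
          unfold updRow; rw [hcl]; simp
        rw [hup, ih _ (okF_oorr h hds)]
        simp only [firstField, List.map_cons, hcl]
        simp [oorr]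
        by_cases ht : pvTruthy r.admin = true <;> simp [ht, hds]
      · have hne2 : (firstField (((it :: rest).map classify).filterMap id) "admin_max_fine")
            = firstField ((rest.map classify).filterMap id) "admin_max_fine" := by
          simp [firstField, hcl, hf]
        rw [hne2]
        have hd' : (updRow r it).admin = r.admin := by
          unfold updRow; rw [hcl]; simp [hf]; split_ifs <;> rfl
        rw [ih _ (by rw [hd']; exact h), hd']

lemma foldl_updRow_emp (its : List (List (String × Option String))) (r : PRow)
    (h : okF r.emp) :
    (its.foldl updRow r).emp =
      oorr r.emp (firstField ((its.map classify).filterMap id) "criminal_employer_penalty") := by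
  induction its generalizing r with
  | nil => simp [firstField, oorr_none_of_okF h]
  | cons it rest ih =>
    rw [List.foldl_cons]
    cases hcl : classify it with
    | none =>
      have hup : updRow r it = r := by unfold updRow; rw [hcl]
      rw [hup, ih r h]
      simp [hcl]
    | some p =>
      obtain ⟨f, desc⟩ := p
      have hds := classify_truthy hcl
      by_cases hf : f = "criminal_employer_penalty"
      · subst hf
        have hup : updRow r it = { r with emp := oorr r.emp (some desc) } := by
          unfold updRow; rw [hcl]
          have h1 : "criminal_employer_penalty" ≠ "criminal_death_penalty" := by decide
          have h2 : "criminal_employer_penalty" ≠ "admin_max_fine" := by decide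
          simp [h1, h2]
        rw [hup, ih _ (okF_oorr h hds)]
        simp only [firstField, List.map_cons, hcl]
        simp [oorr]
        by_cases ht : pvTruthy r.emp = true <;> simp [ht, hds]
      · have hne2 : (firstField (((it :: rest).map classify).filterMap id) "criminal_employer_penalty")
            = firstField ((rest.map classify).filterMap id) "criminal_employer_penalty" := by
          simp [firstField, hcl, hf]
        rw [hne2]
        have hd' : (updRow r it).emp = r.emp := by
          unfold updRow; rw [hcl]
          dsimp only
          split_ifs with g1 g2
          · rfl
          · rfl
          · rcases classify_field hcl with hx | hx | hx <;> simp_all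
        rw [ih _ (by rw [hd']; exact h), hd']

-- per-group: A's accumulated row prints as B's assembled row
lemma rowToList_aRow (c : String) (its : List (List (String × Option String)))
    (h : its ≠ []) : rowToList (aRow c its) = rowOfGroup c its := by
  unfold rowToList aRow rowOfGroup
  have hart := foldl_updRow_art its (initRow c (its.head?.getD []))
  have htit := foldl_updRow_title its (initRow c (its.head?.getD []))
  have hde := foldl_updRow_death its (initRow c (its.head?.getD [])) (Or.inl rfl)
  have had := foldl_updRow_admin its (initRow c (its.head?.getD [])) (Or.inl rfl)
  have hem := foldl_updRow_emp its (initRow c (its.head?.getD [])) (Or.inl rfl)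
  rw [hart, htit, hde, had, hem]
  simp [initRow, oorr, pvTruthy]

lemma aRow_append (c : String) (its : List (List (String × Option String)))
    (it' : List (String × Option String)) (h : its ≠ []) :
    aRow c (its ++ [it']) = updRow (aRow c its) it' := by
  cases its with
  | nil => exact absurd rfl h
  | cons a t => simp [aRow, List.foldl_append]

-- one item preserves the A-state/grouping correspondence
lemma inv_step (d : PySem.Dict String PRow)
    (g : PySem.Dict String (List (List (String × Option String))))
    (item : List (String × Option String))
    (hn : g.keys.Nodup) (hne : ∀ p ∈ g.items, p.2 ≠ []) (h : d.items = g.items.map f0) :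
    (stepB g item).keys.Nodup ∧ (∀ p ∈ (stepB g item).items, p.2 ≠ []) ∧
      (stepA d item).items = (stepB g item).items.map f0 := by
  by_cases hc0 : codeOf item = ""
  · rw [stepA_of_code_empty hc0, stepB_of_code_empty hc0]
    exact ⟨hn, hne, h⟩
  · have hkeys : d.keys = g.keys := by
      show d.items.map (·.1) = g.items.map (·.1)
      rw [h, List.map_map]
      rfl
    have dnod : d.keys.Nodup := by rw [hkeys]; exact hn
    have hcont : d.contains (codeOf item) = g.contains (codeOf item) := by
      rw [PySem.Dict.contains_eq_decide_mem_keys, PySem.Dict.contains_eq_decide_mem_keys, hkeys]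
    have hBstep : stepB g item = g.modify (codeOf item) [] (· ++ [item]) := by
      simp [stepB, hc0]
    have hmod : g.modify (codeOf item) [] (· ++ [item])
        = g.insert (codeOf item) (g.getD (codeOf item) [] ++ [item]) := rfl
    by_cases hg : g.contains (codeOf item) = true
    · -- the article code is already grouped
      have hck : codeOf item ∈ g.keys := by
        have := PySem.Dict.contains_eq_decide_mem_keys g (codeOf item)
        rw [hg] at this
        exact of_decide_eq_true this.symm
      obtain ⟨p, hp, hp1⟩ := List.mem_map.mp hck
      obtain ⟨c1, its⟩ := p
      simp only at hp1
      subst hp1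
      have hgets : g.get? (codeOf item) = some its := PySem.Dict.get?_of_mem_items g hp hn
      have hgetd : g.getD (codeOf item) [] = its := PySem.Dict.getD_of_get?_eq_some g [] hgets
      have hdmem : (codeOf item, aRow (codeOf item) its) ∈ d.items := by
        rw [h]
        exact List.mem_map.mpr ⟨_, hp, rfl⟩
      have hds : d.get? (codeOf item) = some (aRow (codeOf item) its) :=
        PySem.Dict.get?_of_mem_items d hdmem dnod
      have hA := stepA_items_of_contains dnod (hcont.trans hg) hds rfl hc0
      rw [hBstep, hmod, hgetd]
      refine ⟨?_, ?_, ?_⟩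
      · rw [PySem.Dict.keys_insert_of_contains g _ hg]; exact hn
      · intro q hq
        rw [PySem.Dict.items_insert_of_contains g _ hg] at hq
        obtain ⟨q0, hq0, hq0e⟩ := List.mem_map.mp hq
        by_cases hb : (q0.1 == codeOf item) = true
        · rw [if_pos hb] at hq0e; subst hq0e; simp
        · rw [if_neg hb] at hq0e; subst hq0e; exact hne q0 hq0
      · rw [hA, PySem.Dict.items_insert_of_contains g _ hg, h, List.map_map, List.map_map]
        apply List.map_congr_left
        intro q hq
        by_cases hb : q.1 = codeOf item
        · have hgq : g.get? q.1 = some q.2 :=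
            PySem.Dict.get?_of_mem_items g (by simpa using hq) hn
          have hq2 : q.2 = its := by
            rw [hb, hgets] at hgq; exact (Option.some_inj.mp hgq).symm
          have hbb : (q.1 == codeOf item) = true := by simp [hb]
          simp only [Function.comp, f0, hbb, if_true, hq2]
          rw [aRow_append _ _ _ (hne _ hp)]
        · have hbb : (q.1 == codeOf item) = false := by simp [hb]
          simp only [Function.comp, f0, hbb, Bool.false_eq_true, if_false]
    · -- a fresh article code
      have hgf : g.contains (codeOf item) = false := by
        cases hx : g.contains (codeOf item)
        · rfl
        · exact absurd hx hg
      have hck : codeOf item ∉ g.keys := by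
        have := PySem.Dict.contains_eq_decide_mem_keys g (codeOf item)
        rw [hgf] at this
        exact of_decide_eq_false this.symm
      have hA := stepA_items_of_not_contains (hcont.trans hgf) rfl hc0
      rw [hBstep, hmod, PySem.Dict.getD_of_not_contains g [] hgf]
      refine ⟨?_, ?_, ?_⟩
      · rw [PySem.Dict.keys_insert_of_not_contains g _ hgf]
        apply List.Nodup.append hn (List.nodup_singleton _)
        intro a ha hb
        simp only [List.mem_singleton] at hb
        subst hb
        exact hck ha
      · intro q hq
        rw [PySem.Dict.items_insert_of_not_contains g _ hgf] at hq
        rcases List.mem_append.mp hq with hq | hq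
        · exact hne q hq
        · simp only [List.mem_singleton] at hq
          subst hq
          simp
      · rw [hA, PySem.Dict.items_insert_of_not_contains g _ hgf, List.map_append, h]
        rfl

-- the correspondence holds along the whole candidate list
lemma inv_foldl (l : List (List (String × Option String)))
    (d : PySem.Dict String PRow)
    (g : PySem.Dict String (List (List (String × Option String))))
    (hn : g.keys.Nodup) (hne : ∀ p ∈ g.items, p.2 ≠ []) (h : d.items = g.items.map f0) :
    (l.foldl stepB g).keys.Nodup ∧ (∀ p ∈ (l.foldl stepB g).items, p.2 ≠ []) ∧
      (l.foldl stepA d).items = (l.foldl stepB g).items.map f0 := by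
  induction l generalizing d g with
  | nil => exact ⟨hn, hne, h⟩
  | cons it rest ih =>
    obtain ⟨hn', hne', h'⟩ := inv_step d g it hn hne h
    exact ih (stepA d it) (stepB g it) hn' hne' h'

-- ===== VERDICT (by name: the statement is the Claim_ definition above) =====
theorem summarize_penalty_candidates_spec : Claim_equal_summarize_penalty_candidates := by
  intro candidates _
  unfold Spec_summarize_penalty_candidates summarize_penalty_candidates summarize_penalty_candidates_alt
  obtain ⟨hn, hne, h⟩ := inv_foldl candidates PySem.Dict.empty PySem.Dict.empty
    PySem.Dict.nodup_keys_empty (by intro p hp; cases hp) rfl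
  show ((candidates.foldl stepA PySem.Dict.empty).items.map (·.2)).map rowToList = _
  rw [h, List.map_map, List.map_map]
  apply List.map_congr_left
  intro p hp
  exact rowToList_aRow p.1 p.2 (hne p hp)
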